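-- pv_equiv track=rewrite | github.com/gcmestre/oligos_prediction | src/oligos_prediction/generate_features.py | calculate_repeating_motifs
-- ===== SOURCE A (Python) =====
-- def calculate_repeating_motifs(sequence: str) -> int:
--     """_summary_
--
--     Args:
--         sequence (str): _description_
--
--     Returns:
--         int: _description_
--     """
--     motifs = 0
--     for motif_len in range(2,7):
--         for i in range(len(sequence) - motif_len + 1):
--             motif = sequence[i: i + motif_len]
--             if sequence.count(motif) > 1:
--                 motifs += 1
--
--     return motifs
-- ===== SOURCE B (Python) =====
-- def calculate_repeating_motifs(sequence: str) -> int: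
--     n = len(sequence)
--     total = 0
--     for motif_len in range(2, 7):
--         first = {}
--         last = {}
--         for i in range(n - motif_len + 1):
--             motif = sequence[i:i + motif_len]
--             first.setdefault(motif, i)
--             last[motif] = i
--         for i in range(n - motif_len + 1):
--             motif = sequence[i:i + motif_len]
--             if last[motif] - first[motif] >= motif_len:
--                 total += 1
--     return total
-- ===== Notes on version B (the rewrite author's own statement) =====
-- stated objective: faster
-- what changed: Replaces A's per-position sequence.count scan (an O(n) substring count for each of the ~5n windows) by, per motif length, one dict-building pass recording each motif's first and last occurrence index and one pass counting positions whose motif satisfies last - first >= length, which holds exactly when Python's non-overlapping count exceeds 1.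
import Mathlib
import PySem

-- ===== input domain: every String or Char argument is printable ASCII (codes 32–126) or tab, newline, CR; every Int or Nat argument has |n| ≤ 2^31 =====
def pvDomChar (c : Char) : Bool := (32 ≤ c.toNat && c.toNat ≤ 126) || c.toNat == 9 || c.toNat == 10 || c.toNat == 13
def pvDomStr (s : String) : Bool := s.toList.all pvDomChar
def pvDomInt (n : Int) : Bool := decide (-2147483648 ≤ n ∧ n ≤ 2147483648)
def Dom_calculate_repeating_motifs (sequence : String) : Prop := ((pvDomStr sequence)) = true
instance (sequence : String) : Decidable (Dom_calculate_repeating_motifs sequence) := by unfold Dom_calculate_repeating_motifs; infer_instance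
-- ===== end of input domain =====

-- B replaces A's per-position sequence.count scan by two dict passes per motif length
-- (first/last occurrence index of each motif; a motif recurs non-overlapping iff last - first >= length).

-- ===== PORT A =====
-- inner loop 'for i in range(len(sequence) - motif_len + 1): ...' of A
def pvA_inner (sequence : String) (motifs : Int) (motif_len : Int) : Int :=
  (PySem.List.pyRange 0 (PySem.Str.len sequence - motif_len + 1) 1).foldl
    (fun motifs i =>
      if 1 < PySem.Str.count sequence
          (PySem.Str.slice sequence (some i) (some (i + motif_len)))
      then motifs + 1 else motifs) motifs

def calculate_repeating_motifs (sequence : String) : Int :=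
  (PySem.List.pyRange 2 7 1).foldl (pvA_inner sequence) 0

-- ===== PORT B =====
-- first pass of B: (first, last) dicts — first[motif] via setdefault, last[motif] by assignment
def pvB_scan (sequence : String) (motif_len : Int) :
    PySem.Dict String Int × PySem.Dict String Int :=
  (PySem.List.pyRange 0 (PySem.Str.len sequence - motif_len + 1) 1).foldl
    (fun fl i =>
      (fl.1.setdefault (PySem.Str.slice sequence (some i) (some (i + motif_len))) i,
       fl.2.insert (PySem.Str.slice sequence (some i) (some (i + motif_len))) i))
    (PySem.Dict.empty, PySem.Dict.empty)

-- second pass of B; last[motif]/first[motif] are plain lookups (the key is always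
-- present, inserted by the first pass over the same indices), ported as getD
def pvB_inner (sequence : String) (total : Int) (motif_len : Int) : Int :=
  (PySem.List.pyRange 0 (PySem.Str.len sequence - motif_len + 1) 1).foldl
    (fun total i =>
      if motif_len ≤
          (pvB_scan sequence motif_len).2.getD
            (PySem.Str.slice sequence (some i) (some (i + motif_len))) 0
          - (pvB_scan sequence motif_len).1.getD
            (PySem.Str.slice sequence (some i) (some (i + motif_len))) 0
      then total + 1 else total) total

def calculate_repeating_motifs_alt (sequence : String) : Int :=
  (PySem.List.pyRange 2 7 1).foldl (pvB_inner sequence) 0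

-- ===== PRECONDITION & SPEC =====
def Spec_calculate_repeating_motifs (sequence : String) (out : Int) : Prop := out = calculate_repeating_motifs_alt sequence
instance (sequence : String) (out : Int) : Decidable (Spec_calculate_repeating_motifs sequence out) := by unfold Spec_calculate_repeating_motifs; infer_instance

-- ===== CLAIM (what is proved, stated in full; the proofs are below) =====
def Claim_equal_calculate_repeating_motifs : Prop := ∀ (sequence : String), Dom_calculate_repeating_motifs sequence → Spec_calculate_repeating_motifs sequence (calculate_repeating_motifs sequence)

-- ===== LEMMAS AND PROOFS =====

-- accumulator of Chars.count.go is additive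
lemma pvGoAcc (m : List Char) (fuel : Nat) : ∀ (l : List Char) (acc : Nat),
    PySem.Chars.count.go m fuel l acc = acc + PySem.Chars.count.go m fuel l 0 := by
  induction fuel with
  | zero => intro l acc; simp [PySem.Chars.count.go]
  | succ fuel ih =>
    intro l acc
    cases l with
    | nil => simp [PySem.Chars.count.go]
    | cons c t =>
      simp only [PySem.Chars.count.go]
      split_ifs with h
      · rw [ih ((c :: t).drop m.length) (acc + 1), ih ((c :: t).drop m.length) (0 + 1)]
        omega
      · exact ih t acc

-- go ≥ 1 ↔ some occurrence of m
lemma pvGoSpec1 (m : List Char) (hm : m ≠ []) (fuel : Nat) : ∀ (l : List Char), l.length ≤ fuel →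
    (0 < PySem.Chars.count.go m fuel l 0 ↔ ∃ a, m <+: l.drop a) := by
  induction fuel with
  | zero =>
    intro l hl
    have : l = [] := List.eq_nil_of_length_eq_zero (Nat.le_zero.mp hl)
    subst this
    simp [PySem.Chars.count.go, List.prefix_nil, hm]
  | succ fuel ih =>
    intro l hl
    cases l with
    | nil => simp [PySem.Chars.count.go, List.prefix_nil, hm]
    | cons c t =>
      simp only [PySem.Chars.count.go]
      split_ifs with h
      · have hp : m <+: (c :: t) := List.isPrefixOf_iff_prefix.mp h
        rw [pvGoAcc]
        constructor
        · intro _; exact ⟨0, by simpa using hp⟩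
        · intro _; omega
      · have hp : ¬ m <+: (c :: t) := fun hh => h (List.isPrefixOf_iff_prefix.mpr hh)
        rw [ih t (by simpa using Nat.lt_succ_iff.mp (by simpa using hl))]
        constructor
        · rintro ⟨a, ha⟩; exact ⟨a + 1, by simpa using ha⟩
        · rintro ⟨a, ha⟩
          cases a with
          | zero => exact absurd (by simpa using ha) hp
          | succ a => exact ⟨a, by simpa using ha⟩

-- go ≥ 2 ↔ two occurrences of m at distance ≥ |m|
lemma pvGoSpec2 (m : List Char) (hm : m ≠ []) (fuel : Nat) : ∀ (l : List Char), l.length ≤ fuel →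
    (1 < PySem.Chars.count.go m fuel l 0 ↔
      ∃ a b, a + m.length ≤ b ∧ m <+: l.drop a ∧ m <+: l.drop b) := by
  have hm1 : 1 ≤ m.length := List.length_pos_iff.mpr hm
  induction fuel with
  | zero =>
    intro l hl
    have : l = [] := List.eq_nil_of_length_eq_zero (Nat.le_zero.mp hl)
    subst this
    simp [PySem.Chars.count.go, List.prefix_nil, hm]
  | succ fuel ih =>
    intro l hl
    cases l with
    | nil => simp [PySem.Chars.count.go, List.prefix_nil, hm]
    | cons c t =>
      simp only [PySem.Chars.count.go]
      split_ifs with h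
      · have hp : m <+: (c :: t) := List.isPrefixOf_iff_prefix.mp h
        rw [pvGoAcc]
        have hdl : ((c :: t).drop m.length).length ≤ fuel := by
          simp only [List.length_drop, List.length_cons] at *
          omega
        have h1 := pvGoSpec1 m hm fuel ((c :: t).drop m.length) hdl
        constructor
        · intro hgt
          have : 0 < PySem.Chars.count.go m fuel ((c :: t).drop m.length) 0 := by omega
          obtain ⟨a, ha⟩ := h1.mp this
          rw [List.drop_drop] at ha
          exact ⟨0, a + m.length, by omega, by simpa using hp, by simpa [Nat.add_comm] using ha⟩
        · rintro ⟨a, b, hab, _, hb⟩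
          have hmem : m <+: ((c :: t).drop m.length).drop (b - m.length) := by
            rw [List.drop_drop, show m.length + (b - m.length) = b by omega]
            exact hb
          have := h1.mpr ⟨b - m.length, hmem⟩
          omega
      · have hp : ¬ m <+: (c :: t) := fun hh => h (List.isPrefixOf_iff_prefix.mpr hh)
        rw [ih t (by simpa using Nat.lt_succ_iff.mp (by simpa using hl))]
        constructor
        · rintro ⟨a, b, hab, ha, hb⟩
          exact ⟨a + 1, b + 1, by omega, by simpa using ha, by simpa using hb⟩
        · rintro ⟨a, b, hab, ha, hb⟩
          cases a with
          | zero => exact absurd (by simpa using ha) hp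
          | succ a =>
            cases b with
            | zero => omega
            | succ b => exact ⟨a, b, by omega, by simpa using ha, by simpa using hb⟩

-- Python's s.count(m) > 1 ↔ two occurrences of m at distance ≥ |m|
lemma pvCountTwo (cs m : List Char) (hm : m ≠ []) :
    (1 < PySem.Chars.count cs m ↔
      ∃ a b, a + m.length ≤ b ∧ m <+: cs.drop a ∧ m <+: cs.drop b) := by
  have he : m.isEmpty = false := by simpa using hm
  simp only [PySem.Chars.count, he, Bool.false_eq_true, if_false]
  exact pvGoSpec2 m hm cs.length cs le_rfl

-- find? on range' returns the FIRST index satisfying p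
lemma pvFindFirst (p : Nat → Bool) : ∀ (n s j : Nat), (List.range' s n).find? p = some j →
    p j = true ∧ s ≤ j ∧ j < s + n ∧ ∀ i, s ≤ i → i < j → p i = false := by
  intro n
  induction n with
  | zero => intro s j h; simp at h
  | succ n ih =>
    intro s j h
    rw [List.range'_succ] at h
    cases hp : p s with
    | true =>
      rw [List.find?_cons_of_pos hp] at h
      obtain rfl : s = j := by simpa using h
      exact ⟨hp, le_refl _, by omega, fun i h1 h2 => absurd (lt_of_le_of_lt h1 h2) (lt_irrefl _)⟩
    | false =>
      rw [List.find?_cons_of_neg (by simp [hp])] at h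
      obtain ⟨h1, h2, h3, h4⟩ := ih (s + 1) j h
      refine ⟨h1, by omega, by omega, fun i hi1 hi2 => ?_⟩
      by_cases hise : i = s
      · subst hise; exact hp
      · exact h4 i (by omega) hi2

-- find? on the REVERSED range' returns the LAST index satisfying p
lemma pvFindLast (p : Nat → Bool) : ∀ (n s j : Nat), (List.range' s n).reverse.find? p = some j →
    p j = true ∧ s ≤ j ∧ j < s + n ∧ ∀ i, j < i → i < s + n → p i = false := by
  intro n
  induction n with
  | zero => intro s j h; simp at h
  | succ n ih =>
    intro s j h
    rw [List.range'_1_concat, List.reverse_append] at h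
    simp only [List.reverse_cons, List.reverse_nil, List.nil_append, List.singleton_append] at h
    cases hp : p (s + n) with
    | true =>
      rw [List.find?_cons_of_pos hp] at h
      obtain rfl : s + n = j := by simpa using h
      exact ⟨hp, by omega, by omega, fun i h1 h2 => by omega⟩
    | false =>
      rw [List.find?_cons_of_neg (by simp [hp])] at h
      obtain ⟨h1, h2, h3, h4⟩ := ih s j h
      refine ⟨h1, h2, by omega, fun i hi1 hi2 => ?_⟩
      by_cases hise : i = s + n
      · subst hise; exact hp
      · exact h4 i hi1 (by omega)

-- a setdefault-fold keeps the FIRST binding of each key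
lemma pvFoldSetdefaultGet {κ ν α : Type} [BEq κ] [LawfulBEq κ] (k : α → κ) (v : α → ν) :
    ∀ (xs : List α) (d : PySem.Dict κ ν) (key : κ),
      (xs.foldl (fun d x => d.setdefault (k x) (v x)) d).get? key
        = (d.get? key).or ((xs.find? (fun x => k x == key)).map v) := by
  intro xs
  induction xs with
  | nil => intro d key; simp
  | cons x xs ih =>
    intro d key
    simp only [List.foldl_cons]
    rw [ih]
    by_cases h : k x = key
    · subst h
      rw [List.find?_cons_of_pos (by simp)]
      rw [PySem.Dict.get?_setdefault_self]
      cases d.get? (k x) <;> simp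
    · rw [PySem.Dict.get?_setdefault_of_ne _ _ (Ne.symm h)]
      rw [List.find?_cons_of_neg (by simp [h])]

-- an insert-fold keeps the LAST binding of each key
lemma pvFoldInsertGet {κ ν α : Type} [BEq κ] [LawfulBEq κ] (k : α → κ) (v : α → ν) :
    ∀ (xs : List α) (d : PySem.Dict κ ν) (key : κ),
      (xs.foldl (fun d x => d.insert (k x) (v x)) d).get? key
        = ((xs.reverse.find? (fun x => k x == key)).map v).or (d.get? key) := by
  intro xs
  induction xs with
  | nil => intro d key; simp
  | cons x xs ih =>
    intro d key
    simp only [List.foldl_cons, List.reverse_cons]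
    rw [ih]
    by_cases h : k x = key
    · subst h
      cases hf : xs.reverse.find? (fun x' => k x' == k x) with
      | none => simp [List.find?_append, hf, PySem.Dict.get?_insert_self]
      | some y => simp [List.find?_append, hf]
    · cases hf : xs.reverse.find? (fun x' => k x' == key) with
      | none => simp [List.find?_append, hf, h, PySem.Dict.get?_insert_of_ne _ _ (Ne.symm h)]
      | some y => simp [List.find?_append, hf]

-- the window at each scanned index has length exactly L
lemma pvWindowLen (cs : List Char) (L p : Nat) (hp : p + L ≤ cs.length) :
    ((cs.drop p).take L).length = L := by
  simp only [List.length_take, List.length_drop]; omega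

-- occurrence of the length-L window at p, re-read as a prefix of a tail
lemma pvOccIff (cs : List Char) (L p j : Nat) (hL : 1 ≤ L) (hp : p + L ≤ cs.length) :
    (((cs.drop j).take L = (cs.drop p).take L ∧ j + L ≤ cs.length) ↔
      (cs.drop p).take L <+: cs.drop j) := by
  have hlen := pvWindowLen cs L p hp
  constructor
  · rintro ⟨he, hj⟩
    rw [← he]
    exact List.take_prefix _ _
  · intro hpre
    have hl2 := hpre.length_le
    rw [hlen, List.length_drop] at hl2
    have hpe := List.prefix_iff_eq_take.mp hpre
    rw [hlen] at hpe
    exact ⟨hpe.symm, by omega⟩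

-- the key built by both ports, as a list of chars
lemma pvKeyToList (s : String) (j L' : Nat) :
    (PySem.Str.slice s (some (j : Int)) (some ((j : Int) + (L' : Int)))).toList
      = (s.toList.drop j).take L' := by
  rw [PySem.Str.toList_slice, PySem.Chars.slice_eq_listSlice, PySem.List.slice_natCast_add]

-- per-motif-length equality of A's inner loop and B's two passes
lemma pv_inner_eq (s : String) (L : Int) (hL : 2 ≤ L) (t : Int) :
    pvA_inner s t L = pvB_inner s t L := by
  obtain ⟨L', rfl⟩ : ∃ L' : Nat, L = (L' : Int) :=
    ⟨L.toNat, (Int.toNat_of_nonneg (by omega)).symm⟩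
  have hL2 : 2 ≤ L' := by exact_mod_cast hL
  have hlen : PySem.Str.len s = (s.toList.length : Int) := PySem.Str.len_eq s
  unfold pvA_inner pvB_inner
  by_cases hsmall : s.toList.length < L'
  · rw [PySem.List.pyRange_one_eq_nil (by rw [hlen]; omega)]
    simp
  · rw [not_lt] at hsmall
    set M : Nat := s.toList.length + 1 - L' with hM
    have hMeq : PySem.Str.len s - (L' : Int) + 1 = (M : Int) := by
      rw [hlen, hM]; omega
    -- dict characterizations
    have hfirst : ∀ key : String, (pvB_scan s (L' : Int)).1.get? key
        = ((List.range M).find? (fun j : Nat =>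
            PySem.Str.slice s (some (j : Int)) (some ((j : Int) + (L' : Int))) == key)).map
            (fun j : Nat => (j : Int)) := by
      intro key
      unfold pvB_scan
      rw [PySem.List.foldl_prod_mk
          (fun (d : PySem.Dict String Int) (i : Int) =>
            d.setdefault (PySem.Str.slice s (some i) (some (i + (L' : Int)))) i)
          (fun (d : PySem.Dict String Int) (i : Int) =>
            d.insert (PySem.Str.slice s (some i) (some (i + (L' : Int)))) i)]
      rw [pvFoldSetdefaultGet, PySem.Dict.get?_empty, Option.none_or]
      rw [hMeq, PySem.List.pyRange_zero_nat, List.find?_map, Option.map_map]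
      rfl
    have hlast : ∀ key : String, (pvB_scan s (L' : Int)).2.get? key
        = (((List.range M).reverse.find? (fun j : Nat =>
            PySem.Str.slice s (some (j : Int)) (some ((j : Int) + (L' : Int))) == key)).map
            (fun j : Nat => (j : Int))) := by
      intro key
      unfold pvB_scan
      rw [PySem.List.foldl_prod_mk
          (fun (d : PySem.Dict String Int) (i : Int) =>
            d.setdefault (PySem.Str.slice s (some i) (some (i + (L' : Int)))) i)
          (fun (d : PySem.Dict String Int) (i : Int) =>
            d.insert (PySem.Str.slice s (some i) (some (i + (L' : Int)))) i)]
      rw [pvFoldInsertGet]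
      rw [PySem.Dict.get?_empty, Option.or_none]
      rw [hMeq, PySem.List.pyRange_zero_nat, ← List.map_reverse, List.find?_map, Option.map_map]
      rfl
    rw [hMeq, PySem.List.pyRange_zero_nat, List.foldl_map, List.foldl_map]
    apply PySem.List.foldl_congr_mem
    intro acc p hp
    have hpM : p < M := List.mem_range.mp hp
    have hpn : p + L' ≤ s.toList.length := by omega
    -- occurrence of the window at p, as the dicts' key predicate
    have hqiff : ∀ j : Nat,
        ((PySem.Str.slice s (some (j : Int)) (some ((j : Int) + (L' : Int))) ==
          PySem.Str.slice s (some (p : Int)) (some ((p : Int) + (L' : Int)))) = true)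
          ↔ ((s.toList.drop j).take L' = (s.toList.drop p).take L') := by
      intro j
      rw [beq_iff_eq, ← String.toList_inj, pvKeyToList, pvKeyToList]
    have hocc : ∀ j : Nat,
        (((PySem.Str.slice s (some (j : Int)) (some ((j : Int) + (L' : Int))) ==
          PySem.Str.slice s (some (p : Int)) (some ((p : Int) + (L' : Int)))) = true) ∧ j < M)
          ↔ (s.toList.drop p).take L' <+: s.toList.drop j := by
      intro j
      rw [← pvOccIff s.toList L' p j (by omega) hpn, hqiff j]
      constructor
      · rintro ⟨h1, h2⟩; exact ⟨h1, by omega⟩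
      · rintro ⟨h1, h2⟩; exact ⟨h1, by omega⟩
    -- first and last occurrence
    have hqp : (PySem.Str.slice s (some (p : Int)) (some ((p : Int) + (L' : Int))) ==
        PySem.Str.slice s (some (p : Int)) (some ((p : Int) + (L' : Int)))) = true := by simp
    have hfsome : (((List.range M).find? (fun j : Nat =>
        PySem.Str.slice s (some (j : Int)) (some ((j : Int) + (L' : Int))) ==
          PySem.Str.slice s (some (p : Int)) (some ((p : Int) + (L' : Int)))))).isSome = true :=
      List.find?_isSome.mpr ⟨p, List.mem_range.mpr hpM, hqp⟩
    obtain ⟨f, hf⟩ := Option.isSome_iff_exists.mp hfsome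
    have hlsome : (((List.range M).reverse.find? (fun j : Nat =>
        PySem.Str.slice s (some (j : Int)) (some ((j : Int) + (L' : Int))) ==
          PySem.Str.slice s (some (p : Int)) (some ((p : Int) + (L' : Int)))))).isSome = true :=
      List.find?_isSome.mpr ⟨p, by simpa using List.mem_range.mpr hpM, hqp⟩
    obtain ⟨g, hg⟩ := Option.isSome_iff_exists.mp hlsome
    have hfspec := pvFindFirst _ M 0 f (by rw [← List.range_eq_range']; exact hf)
    have hgspec := pvFindLast _ M 0 g (by rw [← List.range_eq_range']; exact hg)
    simp only [Nat.zero_add] at hfspec hgspec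
    -- the dict lookups evaluate to f and g
    have hfd : (pvB_scan s (L' : Int)).1.getD
        (PySem.Str.slice s (some (p : Int)) (some ((p : Int) + (L' : Int)))) 0 = (f : Int) :=
      PySem.Dict.getD_of_get?_eq_some _ _ (by rw [hfirst, hf]; rfl)
    have hgd : (pvB_scan s (L' : Int)).2.getD
        (PySem.Str.slice s (some (p : Int)) (some ((p : Int) + (L' : Int)))) 0 = (g : Int) :=
      PySem.Dict.getD_of_get?_eq_some _ _ (by rw [hlast, hg]; rfl)
    -- the window is a nonempty motif
    have hm : (s.toList.drop p).take L' ≠ [] := by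
      have hw := pvWindowLen s.toList L' p hpn
      intro hnil
      rw [hnil] at hw
      simp at hw
      omega
    -- condition equivalence
    have hcond : (1 < PySem.Str.count s
        (PySem.Str.slice s (some (p : Int)) (some ((p : Int) + (L' : Int))))) ↔
        ((L' : Int) ≤
          (pvB_scan s (L' : Int)).2.getD
            (PySem.Str.slice s (some (p : Int)) (some ((p : Int) + (L' : Int)))) 0
          - (pvB_scan s (L' : Int)).1.getD
            (PySem.Str.slice s (some (p : Int)) (some ((p : Int) + (L' : Int)))) 0) := by
      rw [hfd, hgd, PySem.Str.count_eq, pvKeyToList]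
      rw [pvCountTwo _ _ hm, pvWindowLen s.toList L' p hpn]
      constructor
      · rintro ⟨a, b, hab, ha, hb⟩
        have ha' := (hocc a).mpr ha
        have hb' := (hocc b).mpr hb
        have hfa : f ≤ a := by
          by_contra hcon
          have := hfspec.2.2.2 a (by omega) (by omega)
          rw [ha'.1] at this
          exact absurd this (by simp)
        have hbg : b ≤ g := by
          by_contra hcon
          have := hgspec.2.2.2 b (by omega) hb'.2
          rw [hb'.1] at this
          exact absurd this (by simp)
        omega
      · intro hfg
        have hfg' : f + L' ≤ g := by omega
        exact ⟨f, g, hfg', (hocc f).mp ⟨hfspec.1, hfspec.2.2.1⟩,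
          (hocc g).mp ⟨hgspec.1, hgspec.2.2.1⟩⟩
    simp only [hcond]

-- ===== VERDICT (by name: the statement is the Claim_ definition above) =====
theorem calculate_repeating_motifs_spec : Claim_equal_calculate_repeating_motifs := by
  unfold Claim_equal_calculate_repeating_motifs
  intro s _
  unfold Spec_calculate_repeating_motifs
  unfold calculate_repeating_motifs calculate_repeating_motifs_alt
  apply PySem.List.foldl_congr_mem
  intro acc x hx
  exact pv_inner_eq s x (PySem.List.mem_pyRange_one.mp hx).1 acc
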